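-- pv_equiv track=rewrite | github.com/BaimuhametovaMadina/projects | виженер.py | check
-- ===== SOURCE A (Python) =====
-- def check(key, cyr):
-- 	flag = False
-- 	if len(key) != 0:
-- 		for i in key:
-- 			if i not in cyr:
-- 				flag = True
-- 				break
-- 	if flag == True or len(key) == 0:
-- 		return False
-- 	else:
-- 		return True
-- ===== SOURCE B (Python) =====
-- def check(key, cyr):
--     # Subset check by sorted-merge: sort the distinct chars of key and of cyr,
--     # then walk both sorted lists with a two-pointer scan.
--     ks = sorted(set(key))
--     cs = sorted(set(cyr))
--     if not ks:
--         return False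
--     j = 0
--     for c in ks:
--         while j < len(cs) and cs[j] < c:
--             j += 1
--         if j == len(cs) or cs[j] != c:
--             return False
--     return True
-- ===== Notes on version B (the rewrite author's own statement) =====
-- stated objective: alternative
-- what changed: Replaces A's per-character membership scan over cyr with a different algorithm: sort the distinct characters of key and of cyr, then decide subset by a single two-pointer merge walk over the two sorted lists.
import Mathlib
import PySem

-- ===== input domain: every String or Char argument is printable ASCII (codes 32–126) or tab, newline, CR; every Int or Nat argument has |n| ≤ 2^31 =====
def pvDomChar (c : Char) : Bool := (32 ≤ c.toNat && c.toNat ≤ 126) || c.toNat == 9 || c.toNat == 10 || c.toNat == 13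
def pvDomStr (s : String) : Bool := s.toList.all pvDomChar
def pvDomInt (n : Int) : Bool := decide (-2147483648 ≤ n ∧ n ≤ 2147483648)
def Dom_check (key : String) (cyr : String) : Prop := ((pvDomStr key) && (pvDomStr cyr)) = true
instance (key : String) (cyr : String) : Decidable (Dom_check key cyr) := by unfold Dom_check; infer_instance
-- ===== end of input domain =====

-- B replaces A's per-character membership scan with sort-the-distinct-chars + a two-pointer merge subset walk (alternative algorithm; no speed claim).

-- ===== PORT A =====
-- the 'for i in key: if i not in cyr: flag = True; break' loop
-- ('i not in cyr' with i a single char is exactly a char-membership test in cyr)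
def checkLoop (cyr : List Char) : List Char → Bool
  | [] => false
  | i :: rest => if ¬ (cyr.contains i) then true else checkLoop cyr rest

def check (key : String) (cyr : String) : Bool :=
  let flag := if PySem.Str.len key ≠ 0 then checkLoop cyr.toList key.toList else false
  if flag = true ∨ PySem.Str.len key = 0 then false else true

-- ===== PORT B =====
-- 'for c in ks: while j < len(cs) and cs[j] < c: j += 1; if j == len(cs) or cs[j] != c: return False'
-- the while loop advancing j over the sorted cs is the dropWhile; the suffix from j is passed on
def mergeSub : List Char → List Char → Bool
  | [], _ => true
  | c :: ks, cs =>
    let cs' := cs.dropWhile (fun x => decide (x < c))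
    match cs' with
    | [] => false
    | d :: _ => if d ≠ c then false else mergeSub ks cs'

def check_alt (key : String) (cyr : String) : Bool :=
  let ks := PySem.List.sorted (PySem.Set.ofList key.toList) (fun x => x) false
  let cs := PySem.List.sorted (PySem.Set.ofList cyr.toList) (fun x => x) false
  if ks = [] then false else mergeSub ks cs

-- ===== PRECONDITION & SPEC =====
def Spec_check (key : String) (cyr : String) (out : Bool) : Prop := out = check_alt key cyr
instance (key : String) (cyr : String) (out : Bool) : Decidable (Spec_check key cyr out) := by unfold Spec_check; infer_instance

-- ===== CLAIM (what is proved, stated in full; the proofs are below) =====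
def Claim_equal_check : Prop := ∀ (key : String) (cyr : String), Dom_check key cyr → Spec_check key cyr (check key cyr)

-- ===== LEMMAS AND PROOFS =====

theorem checkLoop_eq_not_all (cyr l : List Char) :
    checkLoop cyr l = !(l.all (fun i => cyr.contains i)) := by
  induction l with
  | nil => rfl
  | cons i rest ih =>
    simp only [checkLoop, List.all_cons]
    by_cases h : cyr.contains i = true <;> simp [ih]

theorem mem_dropWhile_lt_of_gt {cs : List Char} {c e : Char} (hce : c < e) :
    e ∈ cs.dropWhile (fun x => decide (x < c)) ↔ e ∈ cs := by
  constructor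
  · exact fun h => (cs.dropWhile_sublist _).mem h
  · intro h
    rw [← List.takeWhile_append_dropWhile (p := fun x => decide (x < c)) (l := cs),
        List.mem_append] at h
    rcases h with h | h
    · have := List.mem_takeWhile_imp h
      simp at this
      exact absurd this (by exact not_lt.mpr hce.le)
    · exact h

theorem mergeSub_eq_all (ks : List Char) : ∀ (cs : List Char),
    cs.Pairwise (· < ·) → ks.Pairwise (· < ·) →
    mergeSub ks cs = ks.all (fun c => cs.contains c) := by
  induction ks with
  | nil => intro cs _ _; rfl
  | cons c ks ih =>
    intro cs hcs hks
    have hks' := (List.pairwise_cons.mp hks).2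
    have hhd := (List.pairwise_cons.mp hks).1
    have hcs' : (cs.dropWhile (fun x => decide (x < c))).Pairwise (· < ·) :=
      List.Pairwise.sublist (cs.dropWhile_sublist _) hcs
    simp only [mergeSub]
    cases hdrop : cs.dropWhile (fun x => decide (x < c)) with
    | nil =>
      -- every element of cs was dropped, so all are < c, so c ∉ cs
      have hc : c ∉ cs := by
        intro hmem
        rw [← List.takeWhile_append_dropWhile (p := fun x => decide (x < c)) (l := cs),
            List.mem_append, hdrop] at hmem
        simp at hmem
        have := List.mem_takeWhile_imp hmem
        simp at this
      simp [List.all_cons, hc]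
    | cons d t =>
      have hd_ge : ¬ (d < c) := by
        have := List.head?_dropWhile_not (p := fun x => decide (x < c)) (l := cs)
        rw [hdrop] at this
        simpa using this
      by_cases hdc : d = c
      · subst hdc
        show (if d ≠ d then false else mergeSub ks (d :: t)) = ((d :: ks).all fun c => cs.contains c)
        rw [if_neg (fun h => h rfl)]
        have hcmem : d ∈ cs := (cs.dropWhile_sublist _).mem (hdrop ▸ List.mem_cons_self)
        rw [ih (d :: t) (hdrop ▸ hcs') hks']
        have : ∀ e ∈ ks, ((d :: t).contains e) = cs.contains e := by
          intro e he
          have hce : d < e := hhd e he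
          have := mem_dropWhile_lt_of_gt (cs := cs) hce
          rw [hdrop] at this
          simp only [List.contains_eq_mem]
          exact decide_eq_decide.mpr this
        have hcsd : cs.contains d = true := by
          simpa [List.contains_eq_mem] using hcmem
        rw [List.all_cons, hcsd, Bool.true_and]
        rw [Bool.eq_iff_iff, List.all_eq_true, List.all_eq_true]
        constructor
        · intro h x hx
          rw [← this x hx]; exact h x hx
        · intro h x hx
          rw [this x hx]; exact h x hx
      · -- d ≠ c and c ≤ d, so c < d; c ∉ cs
        have hcd : c < d := lt_of_le_of_ne (not_lt.mp hd_ge) (Ne.symm hdc)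
        have hc : c ∉ cs := by
          intro hmem
          rw [← List.takeWhile_append_dropWhile (p := fun x => decide (x < c)) (l := cs),
              List.mem_append, hdrop] at hmem
          rcases hmem with h | h
          · have := List.mem_takeWhile_imp h; simp at this
          · rcases List.mem_cons.mp h with rfl | h
            · exact hdc rfl
            · have : d < c := by
                have := (List.pairwise_cons.mp (hdrop ▸ hcs')).1 c h
                exact this
              exact absurd this (not_lt.mpr hcd.le)
        simp [List.all_cons, hc, hdc]


-- ===== VERDICT (by name: the statement is the Claim_ definition above) =====
theorem check_spec : Claim_equal_check := by
  intro key cyr _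
  unfold Spec_check check check_alt
  simp only [checkLoop_eq_not_all]
  have hks := PySem.List.sorted_ofList_pairwise_lt (xs := key.toList)
  have hcs := PySem.List.sorted_ofList_pairwise_lt (xs := cyr.toList)
  rw [mergeSub_eq_all _ _ hcs hks]
  have hmemk : ∀ x, x ∈ PySem.List.sorted (PySem.Set.ofList key.toList) (fun x => x) false ↔ x ∈ key.toList := by
    intro x
    rw [PySem.List.mem_sorted, PySem.Set.mem_ofList]
  have hmemc : ∀ x, x ∈ PySem.List.sorted (PySem.Set.ofList cyr.toList) (fun x => x) false ↔ x ∈ cyr.toList := by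
    intro x
    rw [PySem.List.mem_sorted, PySem.Set.mem_ofList]
  have hall : (PySem.List.sorted (PySem.Set.ofList key.toList) (fun x => x) false).all
      (fun c => (PySem.List.sorted (PySem.Set.ofList cyr.toList) (fun x => x) false).contains c)
      = key.toList.all (fun c => cyr.toList.contains c) := by
    rw [Bool.eq_iff_iff, List.all_eq_true, List.all_eq_true]
    constructor
    · intro h x hx
      have := h x ((hmemk x).mpr hx)
      simpa [List.contains_eq_mem, hmemc x] using this
    · intro h x hx
      have := h x ((hmemk x).mp hx)
      simpa [List.contains_eq_mem, hmemc x] using this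
  have hnil : (PySem.List.sorted (PySem.Set.ofList key.toList) (fun x => x) false = [])
      ↔ key.toList = [] := by
    rw [PySem.List.sorted_eq_nil_iff]
    constructor
    · intro h
      cases hk : key.toList with
      | nil => rfl
      | cons a t =>
        exfalso
        have : a ∈ PySem.Set.ofList key.toList := (PySem.Set.mem_ofList _ _).mpr (hk ▸ List.mem_cons_self)
        rw [h] at this; exact absurd this (List.not_mem_nil)
    · intro h; rw [h]; rfl
  by_cases hk : key.toList = []
  · have hsort : PySem.Set.ofList key.toList = [] := by rw [hk]; rfl
    simp [hk, PySem.List.sorted_eq_nil_iff]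
  · have hne0 : ¬ (PySem.List.sorted (PySem.Set.ofList key.toList) (fun x => x) false = []) :=
      fun h => hk (hnil.mp h)
    rw [if_neg hne0, hall]
    have hkey : ¬ key = "" := by intro h; exact hk (by simp [h])
    rcases Bool.eq_false_or_eq_true (key.toList.all (fun c => cyr.toList.contains c)) with ha | ha
    · have hno : ∀ x ∈ key.toList, x ∈ cyr.toList := by
        rw [List.all_eq_true] at ha
        intro x hx; simpa using ha x hx
      have hnoex : ¬ ∃ x ∈ key.toList, x ∉ cyr.toList := by
        rintro ⟨x, hx, hn⟩; exact hn (hno x hx)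
      simp [hkey, hnoex]
      exact hno
    · have hex : ∃ x ∈ key.toList, x ∉ cyr.toList := by
        obtain ⟨x, hx, hpx⟩ := List.all_eq_false.mp ha
        exact ⟨x, hx, by simpa using hpx⟩
      simp [hkey, hex]
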